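-- pv_equiv track=rewrite | github.com/ktouloumis/Skyline-Queries | Preprocess/SkAlgs.py | comp_k
-- ===== SOURCE A (Python) =====
-- import numbers
--
-- def count(ls):
--     #takes a list of 'LS', 'GR', 'EQ'
--     #and returns a dictionary with the values
--     ctEQ = ctGR = ctLS = 0
--     for item in ls:
--         if item == 'LS':
--             ctLS = ctLS+1
--         elif item == 'GR':
--             ctGR = ctGR+1
--         elif item == 'EQ':
--             ctEQ = ctEQ+1
--     dict = {'LS':ctLS, 'GR':ctGR, 'EQ':ctEQ}
--     return dict
--
-- def compare(a,b):
--     #compares a and b and returns 'GR','LS','EQ'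
--     if isinstance(a, numbers.Number):
--         if a>b:
--             return 'GR'
--         elif a<b:
--             return 'LS'
--         else:
--             return 'EQ'
--     else:
--         if (a[0]==b[0] and a[1] == b[1]):
--             return 'EQ'
--         elif (b[0]>=a[0] and b[1]<= a[1]):
--             return 'GR'
--         elif (a[0] >= b[0] and a[1] <= b[1]):
--             return 'LS'
--         else:
--             return 'INC'
--
-- def comp_k(a, b, K, N):
--     #returns True if a k-dominates b
--     #returns False otherwise
--     res=[]
--     for aitem, bitem in zip(a, b):
--         res.append(compare(aitem,bitem))
--         dict = count(res)
--
--     if (K==N):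
--         if dict['EQ']==N:
--             return False
--         if 'INC' in res:
--             return False
--         c = dict['GR']+dict['EQ']
--         if c==N:
--             return True
--         return False
--
--     if dict['GR']>=1 and dict['EQ']>=K-dict['GR']:
--         return True
--     return False
-- ===== SOURCE B (Python) =====
-- def comp_k(a, b, K, N):
--     # One pass: count 'greater' and 'equal' positions directly, no list, no recount.
--     gr = eq = 0
--     for x, y in zip(a, b):
--         if x > y:
--             gr += 1
--         elif x == y:
--             eq += 1
--     if K == N:
--         return eq != N and gr + eq == N
--     return gr >= 1 and eq >= K - gr
-- ===== Notes on version B (the rewrite author's own statement) =====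
-- stated objective: faster
-- what changed: B counts greater/equal positions in one pass with two integer counters instead of building a result list and recounting it from scratch on every iteration, and drops the 'INC' check that can never fire for numeric tuples.
-- crash fix: When zip(a,b) is empty (a or b is the empty list) A raises UnboundLocalError because the loop body that defines dict never runs; B returns False. — e.g. on comp_k([], [], 1, 1): A raises UnboundLocalError, B returns false
import Mathlib
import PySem

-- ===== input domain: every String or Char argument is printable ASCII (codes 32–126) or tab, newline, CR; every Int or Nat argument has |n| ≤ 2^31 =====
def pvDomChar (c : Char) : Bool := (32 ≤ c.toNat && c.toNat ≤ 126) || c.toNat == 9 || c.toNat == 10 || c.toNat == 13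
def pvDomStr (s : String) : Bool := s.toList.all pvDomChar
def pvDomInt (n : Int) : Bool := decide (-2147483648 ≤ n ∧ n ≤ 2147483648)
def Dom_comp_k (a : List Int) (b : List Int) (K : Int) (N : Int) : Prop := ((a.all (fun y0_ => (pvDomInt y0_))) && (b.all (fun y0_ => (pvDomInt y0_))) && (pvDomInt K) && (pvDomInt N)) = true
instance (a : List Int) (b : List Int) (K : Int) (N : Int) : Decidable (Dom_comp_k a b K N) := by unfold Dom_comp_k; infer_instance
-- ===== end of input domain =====

-- B replaces A's quadratic build-list-and-recount with a single pass keeping two counters (objective: faster, asymptotic).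

-- ===== PORT A =====
-- count(ls): three counters over the list, then the dict {'LS':…, 'GR':…, 'EQ':…}
def countA (ls : List String) : PySem.Dict String Int :=
  let c := ls.foldl (fun (c : Int × Int × Int) item =>
      if item == "LS" then (c.1 + 1, c.2.1, c.2.2)
      else if item == "GR" then (c.1, c.2.1 + 1, c.2.2)
      else if item == "EQ" then (c.1, c.2.1, c.2.2 + 1)
      else c) (0, 0, 0)
  PySem.Dict.mk [("LS", c.1), ("GR", c.2.1), ("EQ", c.2.2)]

-- compare(a,b): elements are ints, so only the Number branch is reachable
def compareA (a b : Int) : String :=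
  if a > b then "GR" else if a < b then "LS" else "EQ"

-- the loop carries (res, dict); dict is recomputed from the whole res each iteration, as in A.
-- Pre_ requires the loop to run at least once (Python's dict is unbound otherwise), so the
-- initial dict value (countA []) is never the one used.
def comp_k (a : List Int) (b : List Int) (K : Int) (N : Int) : Bool :=
  let st := (a.zip b).foldl (fun (st : List String × PySem.Dict String Int) p =>
      let r := st.1 ++ [compareA p.1 p.2]
      (r, countA r)) ([], countA [])
  let res := st.1
  let dict := st.2
  if K == N then
    -- dict['EQ'] etc.: the keys are always present, so getD with default 0 is exact
    if PySem.Dict.getD dict "EQ" 0 == N then false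
    else if res.contains "INC" then false
    else if PySem.Dict.getD dict "GR" 0 + PySem.Dict.getD dict "EQ" 0 == N then true
    else false
  else
    if PySem.Dict.getD dict "GR" 0 ≥ 1 ∧ PySem.Dict.getD dict "EQ" 0 ≥ K - PySem.Dict.getD dict "GR" 0 then true
    else false

-- ===== PORT B =====
def comp_k_alt (a : List Int) (b : List Int) (K : Int) (N : Int) : Bool :=
  let c := (a.zip b).foldl (fun (c : Int × Int) p =>
      if p.1 > p.2 then (c.1 + 1, c.2)
      else if p.1 == p.2 then (c.1, c.2 + 1)
      else c) (0, 0)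
  if K == N then !(c.2 == N) && (c.1 + c.2 == N)
  else decide (c.1 ≥ 1) && decide (c.2 ≥ K - c.1)

-- ===== PRECONDITION & SPEC =====
-- Pre_ excludes a = [] or b = []: there A's loop never runs and 'dict' is unbound (UnboundLocalError).
def Pre_comp_k (a : List Int) (b : List Int) (K : Int) (N : Int) : Prop := a ≠ [] ∧ b ≠ []
instance (a : List Int) (b : List Int) (K : Int) (N : Int) : Decidable (Pre_comp_k a b K N) := by unfold Pre_comp_k; infer_instance
def pvWitness_comp_k : List Int × List Int × Int × Int := ([1, 2], [0, 2], 2, 2)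

-- On inputs with a or b empty, A raises UnboundLocalError; B returns False.
def Raises_comp_k (a : List Int) (b : List Int) (K : Int) (N : Int) : Prop := a = [] ∨ b = []
instance (a : List Int) (b : List Int) (K : Int) (N : Int) : Decidable (Raises_comp_k a b K N) := by unfold Raises_comp_k; infer_instance
def pvRaiseWitness_comp_k : List Int × List Int × Int × Int := ([], [], 1, 1)
def pvRaiseWitnessOut_comp_k : Bool := false

def Spec_comp_k (a : List Int) (b : List Int) (K : Int) (N : Int) (out : Bool) : Prop := out = comp_k_alt a b K N
instance (a : List Int) (b : List Int) (K : Int) (N : Int) (out : Bool) : Decidable (Spec_comp_k a b K N out) := by unfold Spec_comp_k; infer_instance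

-- ===== CLAIM (what is proved, stated in full; the proofs are below) =====
def Claim_equal_comp_k : Prop := ∀ (a : List Int) (b : List Int) (K : Int) (N : Int), Dom_comp_k a b K N → Pre_comp_k a b K N → Spec_comp_k a b K N (comp_k a b K N)
def Claim_raises_comp_k : Prop := (∀ (a : List Int) (b : List Int) (K : Int) (N : Int), Dom_comp_k a b K N → Raises_comp_k a b K N → ¬ Pre_comp_k a b K N) ∧ (Dom_comp_k (pvRaiseWitness_comp_k.1) (pvRaiseWitness_comp_k.2.1) (pvRaiseWitness_comp_k.2.2.1) (pvRaiseWitness_comp_k.2.2.2) ∧ Raises_comp_k (pvRaiseWitness_comp_k.1) (pvRaiseWitness_comp_k.2.1) (pvRaiseWitness_comp_k.2.2.1) (pvRaiseWitness_comp_k.2.2.2) ∧ comp_k_alt (pvRaiseWitness_comp_k.1) (pvRaiseWitness_comp_k.2.1) (pvRaiseWitness_comp_k.2.2.1) (pvRaiseWitness_comp_k.2.2.2) = pvRaiseWitnessOut_comp_k)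

-- ===== LEMMAS AND PROOFS =====

-- A's fold, named for the proofs
def stepA (st : List String × PySem.Dict String Int) (p : Int × Int) : List String × PySem.Dict String Int :=
  let r := st.1 ++ [compareA p.1 p.2]
  (r, countA r)

-- B's fold step, named
def stepB (c : Int × Int) (p : Int × Int) : Int × Int :=
  if p.1 > p.2 then (c.1 + 1, c.2)
  else if p.1 == p.2 then (c.1, c.2 + 1)
  else c

-- count's inner fold step, named
def stepC (c : Int × Int × Int) (item : String) : Int × Int × Int :=
  if item == "LS" then (c.1 + 1, c.2.1, c.2.2)
  else if item == "GR" then (c.1, c.2.1 + 1, c.2.2)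
  else if item == "EQ" then (c.1, c.2.1, c.2.2 + 1)
  else c

lemma stepA_fold (ps : List (Int × Int)) (r : List String) (d : PySem.Dict String Int) :
    ps.foldl stepA (r, d) =
      (r ++ ps.map (fun p => compareA p.1 p.2),
       if ps = [] then d else countA (r ++ ps.map (fun p => compareA p.1 p.2))) := by
  induction ps generalizing r d with
  | nil => simp
  | cons p ps ih =>
      simp only [List.foldl_cons, List.map_cons]
      rw [show stepA (r, d) p = (r ++ [compareA p.1 p.2], countA (r ++ [compareA p.1 p.2])) from rfl]
      rw [ih]
      cases ps with
      | nil => simp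
      | cons q qs => simp

-- B's fold tracks exactly the GR and EQ counters of count applied to the mapped comparisons
lemma stepB_tracks (ps : List (Int × Int)) (l g e : Int) :
    ((ps.map (fun p => compareA p.1 p.2)).foldl stepC (l, g, e)).2 =
      ps.foldl stepB (g, e) := by
  induction ps generalizing l g e with
  | nil => rfl
  | cons p ps ih =>
      simp only [List.map_cons, List.foldl_cons]
      by_cases h1 : p.1 > p.2
      · rw [show compareA p.1 p.2 = "GR" from by simp [compareA, h1]]
        rw [show stepC (l, g, e) "GR" = (l, g + 1, e) from by simp [stepC]]
        rw [show stepB (g, e) p = (g + 1, e) from by simp [stepB, h1]]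
        exact ih l (g + 1) e
      · by_cases h2 : p.1 < p.2
        · rw [show compareA p.1 p.2 = "LS" from by simp [compareA, h1, h2]]
          rw [show stepC (l, g, e) "LS" = (l + 1, g, e) from by simp [stepC]]
          rw [show stepB (g, e) p = (g, e) from by
            simp only [stepB]; rw [if_neg h1, if_neg (by simp; omega)]]
          exact ih (l + 1) g e
        · have heq : p.1 = p.2 := le_antisymm (not_lt.mp h1) (not_lt.mp h2)
          rw [show compareA p.1 p.2 = "EQ" from by simp [compareA, h1, h2]]
          rw [show stepC (l, g, e) "EQ" = (l, g, e + 1) from by simp [stepC]]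
          rw [show stepB (g, e) p = (g, e + 1) from by simp [stepB, heq]]
          exact ih l g (e + 1)

lemma countA_getD_GR (ls : List String) :
    PySem.Dict.getD (countA ls) "GR" 0 = (ls.foldl stepC (0, 0, 0)).2.1 := by
  rw [show countA ls = PySem.Dict.mk [("LS", (ls.foldl stepC (0, 0, 0)).1),
        ("GR", (ls.foldl stepC (0, 0, 0)).2.1), ("EQ", (ls.foldl stepC (0, 0, 0)).2.2)] from rfl]
  simp [PySem.Dict.getD, PySem.Dict.get?_mk_cons]

lemma countA_getD_EQ (ls : List String) :
    PySem.Dict.getD (countA ls) "EQ" 0 = (ls.foldl stepC (0, 0, 0)).2.2 := by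
  rw [show countA ls = PySem.Dict.mk [("LS", (ls.foldl stepC (0, 0, 0)).1),
        ("GR", (ls.foldl stepC (0, 0, 0)).2.1), ("EQ", (ls.foldl stepC (0, 0, 0)).2.2)] from rfl]
  simp [PySem.Dict.getD, PySem.Dict.get?_mk_cons]

lemma no_INC (ps : List (Int × Int)) :
    (ps.map (fun p => compareA p.1 p.2)).contains "INC" = false := by
  induction ps with
  | nil => rfl
  | cons p ps ih =>
      simp only [List.map_cons, List.contains_cons, ih, Bool.or_false]
      simp [compareA]
      split_ifs <;> simp

theorem comp_k_spec : Claim_equal_comp_k := by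
  intro a b K N _ hpre
  unfold Spec_comp_k comp_k comp_k_alt
  obtain ⟨ha, hb⟩ := hpre
  obtain ⟨x, a', rfl⟩ := List.exists_cons_of_ne_nil ha
  obtain ⟨y, b', rfl⟩ := List.exists_cons_of_ne_nil hb
  have hzip : (x :: a').zip (y :: b') = (x, y) :: a'.zip b' := rfl
  simp only [hzip]
  set ps := (x, y) :: a'.zip b' with hps
  have hne : ps ≠ [] := by simp [hps]
  rw [show (fun (st : List String × PySem.Dict String Int) (p : Int × Int) =>
        (st.1 ++ [compareA p.1 p.2], countA (st.1 ++ [compareA p.1 p.2]))) = stepA from rfl]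
  rw [show (fun (c : Int × Int) (p : Int × Int) =>
        if p.1 > p.2 then (c.1 + 1, c.2) else if p.1 == p.2 then (c.1, c.2 + 1) else c) = stepB from rfl]
  have hA := stepA_fold ps [] (countA [])
  rw [if_neg hne] at hA
  have hres : (ps.foldl stepA ([], countA [])).1 = ps.map (fun p => compareA p.1 p.2) := by
    rw [hA]; simp
  have hdict : (ps.foldl stepA ([], countA [])).2 =
      countA (ps.map (fun p => compareA p.1 p.2)) := by rw [hA]; simp
  rw [hres, hdict, countA_getD_GR, countA_getD_EQ, no_INC, ← stepB_tracks ps 0 0 0]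
  generalize (ps.map (fun p => compareA p.1 p.2)).foldl stepC (0, 0, 0) = t
  obtain ⟨l, g, e⟩ := t
  by_cases hkn : K == N
  · simp only [if_pos hkn, Bool.false_eq_true, if_false]
    by_cases he : e = N
    · simp [he]
    · by_cases hg : g + e = N <;> simp [he, hg]
  · simp only [if_neg hkn]
    by_cases hg : (1 : Int) ≤ g <;> by_cases he : K - g ≤ e <;> simp [hg, he]

@[simp]
theorem comp_k_raises : Claim_raises_comp_k := by
  unfold Claim_raises_comp_k
  constructor
  · intro a b K N _ hr hp
    rcases hr with h | h
    · exact hp.1 h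
    · exact hp.2 h
  · exact ⟨by decide, by decide, by decide⟩
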